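-- pv_equiv track=rewrite | github.com/SinisaV/image-compression | main.py | IC
-- ===== SOURCE A (Python) =====
-- import math
-- from math import log2
--
-- def IC(B, C, L, H):
--     if H - L > 1:
--         if C[L] != C[H]:
--             m = math.floor(0.5 * (L + H))
--             g = math.ceil(log2(C[H] - C[L] + 1))
--             B = encode(B, g, C[m] - C[L])
--
--             if L < m:
--                 IC(B, C, L, m)
--
--             if m < H:
--                 IC(B, C, m, H)
--     return B
--
-- def encode(B, g, m):
--     # Truncate 'm' to fit within 'g' bits
--     max_val = (1 << int(g)) - 1
--     if m > max_val:
--         m = max_val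
--
--     # Encode 'm' as a truncated binary with 'g' bits
--     truncated_binary = format(m, f'0{int(g)}b')
--
--     # Ensure that the encoded binary matches the size of 'g'
--     if len(truncated_binary) > int(g):
--         truncated_binary = truncated_binary[-int(g):]  # Take the least significant 'g' bits
--     elif len(truncated_binary) < int(g):
--         truncated_binary = truncated_binary.zfill(int(g))  # Zero-pad to make it 'g' bits
--
--     B.append(truncated_binary)
--     return B
-- ===== SOURCE B (Python) =====
-- def IC(B, C, L, H):
--     # Iterative re-implementation: explicit stack of (L, H) intervals, preorder
--     # (right child pushed before left), encode logic inlined via bit_length /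
--     # direct bit extraction.  Appends to (and returns) the same list B.
--     stack = [(L, H)]
--     while stack:
--         l, h = stack.pop()
--         if h - l > 1 and C[l] != C[h]:
--             m = (l + h) // 2
--             g = (C[h] - C[l]).bit_length()
--             v = min(C[m] - C[l], (1 << g) - 1)
--             B.append(''.join('1' if (v >> i) & 1 else '0' for i in reversed(range(g))))
--             stack.append((m, h))
--             stack.append((l, m))
--     return B
-- ===== Notes on version B (the rewrite author's own statement) =====
-- stated objective: alternative
-- what changed: Replaces the recursive interpolative coder by an iterative while-loop over an explicit stack of (L,H) intervals (right child pushed before left to keep the preorder append sequence), with the encode helper inlined: bit length via int.bit_length instead of math.ceil(log2(...)), clamping via min, and the g-bit string built by direct bit extraction instead of format/zfill/slice fix-ups.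
-- outside the precondition, e.g. on IC([], [3, 0, 6], 0, 2): A returns ['11'], B returns ['01']; on IC([], [2, 9, 3], -1, 1): A returns ['-01'], B returns ['111']
import Mathlib
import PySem

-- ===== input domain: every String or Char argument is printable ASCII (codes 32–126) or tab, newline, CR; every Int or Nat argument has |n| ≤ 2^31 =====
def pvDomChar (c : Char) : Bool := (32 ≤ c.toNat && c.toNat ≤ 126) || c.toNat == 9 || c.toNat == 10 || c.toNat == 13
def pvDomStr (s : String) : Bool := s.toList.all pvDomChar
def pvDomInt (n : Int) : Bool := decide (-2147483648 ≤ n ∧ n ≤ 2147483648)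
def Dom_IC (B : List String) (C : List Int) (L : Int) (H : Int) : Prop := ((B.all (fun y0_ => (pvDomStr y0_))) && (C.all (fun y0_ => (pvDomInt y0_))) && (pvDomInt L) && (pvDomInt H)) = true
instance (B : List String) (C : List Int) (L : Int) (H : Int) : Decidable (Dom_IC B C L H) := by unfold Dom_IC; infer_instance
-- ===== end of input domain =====

-- B rewrites the recursive interpolative coder as an iterative loop over an explicit
-- stack of (L,H) intervals with the bit-string built by direct bit extraction
-- (objective: alternative decomposition, same cost).  Both Pythons mutate B in place
-- by appending; the equivalence proved here is about the RETURN value (B performs the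
-- same in-place appends as A).

-- ===== PORT A =====
-- bin(n) for n ≥ 0: the digits format() produces before padding
def pvBinChars (n : Nat) : List Char :=
  if n < 2 then [if n % 2 == 1 then '1' else '0']
  else pvBinChars (n / 2) ++ [if n % 2 == 1 then '1' else '0']

-- format(m, f'0{g}b') followed by A's truncate/zfill fix-ups, for m ≥ 0
def pvFmtBin (g : Nat) (n : Nat) : List Char :=
  let tb := List.replicate (g - (pvBinChars n).length) '0' ++ pvBinChars n  -- format(m, f'0{g}b')
  if g < tb.length then tb.drop (tb.length - g)       -- truncated_binary[-g:]  (exact for g ≥ 1; Python's [-0:] quirk is out of reach under Pre_)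
  else if tb.length < g then List.replicate (g - tb.length) '0' ++ tb  -- zfill (dead: already padded)
  else tb

def pvEncode (B : List String) (g : Nat) (m : Int) : List String :=
  let maxVal : Int := ((1 <<< g : Nat) : Int) - 1
  let m' := if m > maxVal then maxVal else m
  -- .toNat: exact for 0 ≤ m', which holds wherever Python A returns normally (Pre_)
  B ++ [String.mk (pvFmtBin g m'.toNat)]

-- math.ceil(log2 n) for n ≥ 1
def pvClog2 (n : Nat) : Nat :=
  if n ≤ 1 then 0 else pvClog2 ((n + 1) / 2) + 1

def IC (B : List String) (C : List Int) (L : Int) (H : Int) : List String :=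
  if _hHL : H - L > 1 then
    match PySem.List.pyGet? C L, PySem.List.pyGet? C H with
    | some cl, some ch =>
      if cl ≠ ch then
        -- math.floor(0.5*(L+H)): exact on Dom (the double 0.5*(L+H) is exact for |L|,|H| ≤ 2^31)
        let m := PySem.Int.floordiv (L + H) 2
        -- math.ceil(log2(C[H]-C[L]+1)), written on .toNat: exact for C[L] ≤ C[H];
        -- Python raises ValueError when C[H] < C[L] (outside Pre_)
        let g := pvClog2 ((ch - cl).toNat + 1)
        match PySem.List.pyGet? C m with
        | some cm =>
          let B1 := pvEncode B g (cm - cl)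
          -- 'if L < m: IC(B, C, L, m)' mutates B in place: the result is threaded
          let B2 := if _hLm : L < m then IC B1 C L m else B1
          if _hmH : m < H then IC B2 C m H else B2
        | none => B   -- Python raises IndexError here (outside Pre_)
      else B
    | _, _ => B       -- Python raises IndexError here (outside Pre_)
  else B
termination_by (H - L).toNat
decreasing_by
  all_goals
    have key : PySem.Int.floordiv (L + H) 2 = (L + H) / 2 :=
      PySem.Int.floordiv_eq_ediv_of_pos (by norm_num)
    omega

-- ===== PORT B =====
-- needed by icLoop's termination measure
theorem pvPow3_lt {a b : Nat} (ha : 1 ≤ a) (hb : 1 ≤ b) : 3 ^ a + 3 ^ b < 3 ^ (a + b) := by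
  have h1 : (3:Nat) ≤ 3 ^ a := by calc (3:Nat) = 3 ^ 1 := rfl
                                       _ ≤ 3 ^ a := Nat.pow_le_pow_right (by norm_num) ha
  have h2 : (3:Nat) ≤ 3 ^ b := by calc (3:Nat) = 3 ^ 1 := rfl
                                       _ ≤ 3 ^ b := Nat.pow_le_pow_right (by norm_num) hb
  have h3 : 3 ^ (a + b) = 3 ^ a * 3 ^ b := pow_add 3 a b
  nlinarith

-- the while loop, stack top at the head (Python's list end); the isSome guards make
-- the lookups total (Python raises IndexError outside them; excluded by Pre_)
def icLoop (C : List Int) (B : List String) (stack : List (Int × Int)) : List String :=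
  match stack with
  | [] => B
  | (l, h) :: st =>
    if hok : h - l > 1 ∧ (PySem.List.pyGet? C l).isSome ∧ (PySem.List.pyGet? C h).isSome
        ∧ PySem.List.pyGet? C l ≠ PySem.List.pyGet? C h then
      -- the guard makes the defaults unreachable
      let cl := (PySem.List.pyGet? C l).getD 0
      let ch := (PySem.List.pyGet? C h).getD 0
      let m := PySem.Int.floordiv (l + h) 2
      if _hm : (PySem.List.pyGet? C m).isSome then
        let cm := (PySem.List.pyGet? C m).getD 0
        -- (C[h]-C[l]).bit_length(), on .toNat: exact for C[l] ≤ C[h] (Pre_)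
        let g := PySem.Int.bitLength (((ch - cl).toNat : Nat) : Int)
        let v := min (cm - cl) (((1 <<< g : Nat) : Int) - 1)
        -- ''.join('1' if (v >> i) & 1 else '0' for i in reversed(range(g))); .toNat exact for 0 ≤ v (Pre_)
        icLoop C (B ++ [String.mk ((List.range g).reverse.map (fun i => if v.toNat >>> i % 2 == 1 then '1' else '0'))]) ((l, m) :: (m, h) :: st)
      else icLoop C B st
    else icLoop C B st
termination_by (stack.map (fun p => 3 ^ ((p.2 - p.1).toNat))).sum
decreasing_by
  all_goals simp only [List.map_cons, List.sum_cons]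
  · -- push case: two strictly smaller intervals replace one
    have key : PySem.Int.floordiv (l + h) 2 = (l + h) / 2 :=
      PySem.Int.floordiv_eq_ediv_of_pos (by norm_num)
    obtain ⟨hhl, -, -, -⟩ := hok
    have hml : 1 ≤ (PySem.Int.floordiv (l + h) 2 - l).toNat := by omega
    have hhm : 1 ≤ (h - PySem.Int.floordiv (l + h) 2).toNat := by omega
    have hsum : (PySem.Int.floordiv (l + h) 2 - l).toNat + (h - PySem.Int.floordiv (l + h) 2).toNat = (h - l).toNat := by omega
    have h3 := pvPow3_lt hml hhm
    rw [hsum] at h3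
    omega
  all_goals
    have : 0 < 3 ^ ((h - l).toNat) := Nat.pow_pos (by norm_num)
    omega

def IC_alt (B : List String) (C : List Int) (L : Int) (H : Int) : List String :=
  icLoop C B [(L, H)]

-- ===== PRECONDITION & SPEC =====
-- Pre_ is the cumulative-array domain IC is written for (in-range, nondecreasing index
-- segment, entirely nonnegative or entirely negative Python indices), plus the calls that
-- return without touching the data (H-L ≤ 1, or C[L] == C[H]).  Outside it A usually
-- raises (ValueError from log2 of a nonpositive argument, or IndexError); on unsorted or
-- sign-mixed wrapped inputs where A still returns, it encodes negative differences through
-- str.zfill/slicing accidents, which B does not reproduce.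
def Pre_IC (B : List String) (C : List Int) (L : Int) (H : Int) : Prop :=
  H - L ≤ 1
  ∨ (PySem.List.pyGet? C L ≠ none ∧ PySem.List.pyGet? C L = PySem.List.pyGet? C H)
  ∨ (0 ≤ L ∧ L ≤ H ∧ H < (C.length : Int) ∧
      List.Pairwise (· ≤ ·) ((C.drop L.toNat).take ((H - L).toNat + 1)))
  ∨ (-(C.length : Int) ≤ L ∧ L ≤ H ∧ H < 0 ∧
      List.Pairwise (· ≤ ·) ((C.drop (L + (C.length : Int)).toNat).take ((H - L).toNat + 1)))
instance (B : List String) (C : List Int) (L : Int) (H : Int) : Decidable (Pre_IC B C L H) := by unfold Pre_IC; infer_instance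

def pvWitness_IC : List String × List Int × Int × Int := (["0"], [0, 1, 3, 7], 0, 3)

def Spec_IC (B : List String) (C : List Int) (L : Int) (H : Int) (out : List String) : Prop := out = IC_alt B C L H
instance (B : List String) (C : List Int) (L : Int) (H : Int) (out : List String) : Decidable (Spec_IC B C L H out) := by unfold Spec_IC; infer_instance

-- ===== CLAIM (what is proved, stated in full; the proofs are below) =====
def Claim_equal_IC : Prop := ∀ (B : List String) (C : List Int) (L : Int) (H : Int), Dom_IC B C L H → Pre_IC B C L H → Spec_IC B C L H (IC B C L H)

-- ===== LEMMAS AND PROOFS =====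

-- ceil(log2(d+1)) is the bit length of d
theorem pvClog2_eq_bitLength (d : Nat) : pvClog2 (d + 1) = PySem.Int.bitLength (d : Int) := by
  induction d using Nat.strong_induction_on with
  | _ d ih =>
    rcases Nat.eq_zero_or_pos d with h0 | h0
    · subst h0; simp [pvClog2]
    · rw [pvClog2]
      have hn : ¬ (d + 1 ≤ 1) := by omega
      simp only [hn, if_false]
      have h2 : (d + 1 + 1) / 2 = d / 2 + 1 := by omega
      rw [h2, ih (d / 2) (by omega), ← PySem.Int.bitLength_natCast h0]

theorem pvBinChars_ne_nil (n : Nat) : (pvBinChars n).length ≥ 1 := by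
  rw [pvBinChars]
  split <;> simp

theorem pvBinChars_len_le (n : Nat) : ∀ k, 1 ≤ n → n < 2 ^ k → (pvBinChars n).length ≤ k := by
  induction n using Nat.strong_induction_on with
  | _ n ih =>
    intro k h1 hk
    rw [pvBinChars]
    by_cases h2 : n < 2
    · simp only [h2, if_true, List.length_singleton]
      rcases Nat.eq_zero_or_pos k with rfl | hk1
      · simp at hk; omega
      · omega
    · simp only [h2, if_false, List.length_append, List.length_singleton]
      have hk2 : 2 ≤ k := by
        by_contra h
        interval_cases k <;> omega
      have := ih (n / 2) (by omega) (k - 1) (by omega)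
        (by
          have : 2 ^ k = 2 ^ (k - 1) * 2 := by
            rw [← pow_succ]; congr 1; omega
          omega)
      omega

-- the padded/truncated format equals direct MSB-first bit extraction
theorem pvFmtBin_eq (g : Nat) : ∀ n : Nat, n < 2 ^ g →
    pvFmtBin g n = (List.range g).reverse.map (fun i => if n >>> i % 2 == 1 then '1' else '0') := by
  induction g with
  | zero =>
    intro n hn
    have : n = 0 := by omega
    subst this
    simp [pvFmtBin, pvBinChars]
  | succ g ih =>
    intro n hn
    have hrange : (List.range (g + 1)).reverse = (List.range g).reverse.map (· + 1) ++ [0] := by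
      rw [List.range_succ_eq_map]
      simp [List.reverse_cons, List.map_reverse]
    by_cases h2 : n < 2
    · -- one binary digit, zero-padded to g+1
      rw [pvFmtBin, pvBinChars]
      simp only [h2, if_true, List.length_singleton]
      have hlen : (List.replicate (g + 1 - 1) '0' ++ [if n % 2 == 1 then '1' else '0']).length = g + 1 := by
        simp
      simp only [hlen, Nat.lt_irrefl, if_false]
      rw [hrange, List.map_append]
      have hmap : (List.range g).reverse.map ((fun i => if n >>> i % 2 == 1 then '1' else '0') ∘ (· + 1))
          = List.replicate g '0' := by
        rw [List.eq_replicate_iff]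
        constructor
        · simp
        · intro c hc
          simp only [List.mem_map] at hc
          obtain ⟨i, _, hi⟩ := hc
          have : n >>> (i + 1) = 0 := by
            rw [Nat.shiftRight_eq_div_pow]
            have h21 : 2 ≤ 2 ^ (i + 1) := by
              calc (2:Nat) = 2 ^ 1 := rfl
                _ ≤ 2 ^ (i + 1) := Nat.pow_le_pow_right (by norm_num) (by omega)
            exact Nat.div_eq_of_lt (by omega)
          simp only [Function.comp_apply, this] at hi
          simpa using hi.symm
      rw [List.map_map, hmap]
      simp [Nat.shiftRight_zero]
    · -- n ≥ 2: peel the last binary digit and use the IH on n / 2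
      have hn2 : n / 2 < 2 ^ g := by
        have : 2 ^ (g + 1) = 2 ^ g * 2 := by rw [pow_succ]
        omega
      have hb' : (pvBinChars (n / 2)).length ≤ g :=
        pvBinChars_len_le (n / 2) g (by omega) hn2
      have hb'1 : 1 ≤ (pvBinChars (n / 2)).length := pvBinChars_ne_nil _
      -- LHS decomposes as fmtBin g (n/2) ++ [last digit]
      have hlhs : pvFmtBin (g + 1) n = pvFmtBin g (n / 2) ++ [if n % 2 == 1 then '1' else '0'] := by
        rw [pvFmtBin, pvFmtBin]
        rw [pvBinChars]
        simp only [h2, if_false]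
        set b' := pvBinChars (n / 2) with hb
        set c := if n % 2 == 1 then '1' else '0' with hc
        have hL1 : (List.replicate (g + 1 - (b' ++ [c]).length) '0' ++ (b' ++ [c])).length = g + 1 := by
          simp; omega
        have hL2 : (List.replicate (g - b'.length) '0' ++ b').length = g := by
          simp; omega
        simp only [hL1, hL2, Nat.lt_irrefl, if_false]
        have : g + 1 - (b' ++ [c]).length = g - b'.length := by simp
        rw [this]
        simp [List.append_assoc]
      rw [hlhs, ih (n / 2) hn2, hrange, List.map_append, List.map_map]
      congr 1
      apply List.map_congr_left
      intro i _
      simp only [Function.comp_apply]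
      have hsh : n >>> (i + 1) = (n / 2) >>> i := by
        simp [Nat.shiftRight_eq_div_pow, Nat.div_div_eq_div_mul, pow_succ, Nat.mul_comm]
      rw [hsh]

-- the inline encoding in the loop equals A's encode helper
theorem pvEncode_eq (B : List String) (cl ch v : Int) :
    B ++ [String.mk ((List.range (PySem.Int.bitLength (((ch - cl).toNat : Nat) : Int))).reverse.map
        (fun i => if (min v (((1 <<< (PySem.Int.bitLength (((ch - cl).toNat : Nat) : Int)) : Nat) : Int) - 1)).toNat >>> i % 2 == 1 then '1' else '0'))]
      = pvEncode B (pvClog2 ((ch - cl).toNat + 1)) v := by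
  rw [pvEncode]
  rw [pvClog2_eq_bitLength]
  set g := PySem.Int.bitLength (((ch - cl).toNat : Nat) : Int) with hg
  have hshift : ((1 <<< g : Nat) : Int) = ((2 ^ g : Nat) : Int) := by
    norm_num [Nat.shiftLeft_eq]
  have hmin : min v (((1 <<< g : Nat) : Int) - 1)
      = (if v > ((1 <<< g : Nat) : Int) - 1 then ((1 <<< g : Nat) : Int) - 1 else v) := by
    by_cases h : v ≤ ((1 <<< g : Nat) : Int) - 1
    · simp [min_eq_left h]; omega
    · push_neg at h
      simp [min_eq_right (le_of_lt h)]; omega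
  have hlt : (if v > ((1 <<< g : Nat) : Int) - 1 then ((1 <<< g : Nat) : Int) - 1 else v).toNat < 2 ^ g := by
    have h1 : (0:Nat) < 2 ^ g := Nat.pow_pos (by norm_num)
    rw [hshift]
    split <;> omega
  rw [hmin, pvFmtBin_eq g _ hlt]

-- the explicit stack reproduces the recursion: processing the top interval first
theorem icLoop_IC (C : List Int) : ∀ (N : Nat) (l h : Int), (h - l).toNat ≤ N →
    ∀ (B : List String) (st : List (Int × Int)),
      icLoop C B ((l, h) :: st) = icLoop C (IC B C l h) st := by
  intro N
  induction N with
  | zero =>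
    intro l h hN B st
    rw [icLoop, IC]
    have : ¬ (h - l > 1) := by omega
    simp [this]
  | succ N ih =>
    intro l h hN B st
    rw [icLoop, IC]
    by_cases hhl : h - l > 1
    · rcases hl : PySem.List.pyGet? C l with _ | cl
      · rw [dif_neg (by simp), dif_pos hhl]
      rcases hh : PySem.List.pyGet? C h with _ | ch
      · rw [dif_neg (by simp), dif_pos hhl]
      by_cases hne : cl ≠ ch
      · have hok : (h - l > 1 ∧ ((some cl : Option Int)).isSome = true
            ∧ ((some ch : Option Int)).isSome = true ∧ (some cl : Option Int) ≠ some ch) :=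
          ⟨hhl, rfl, rfl, by simp [hne]⟩
        rw [dif_pos hok, dif_pos hhl]
        generalize hcl2 : Option.getD (some cl) (0:Int) = cl2
        rw [Option.getD_some] at hcl2
        subst hcl2
        generalize hch2 : Option.getD (some ch) (0:Int) = ch2
        rw [Option.getD_some] at hch2
        subst hch2
        have key : PySem.Int.floordiv (l + h) 2 = (l + h) / 2 :=
          PySem.Int.floordiv_eq_ediv_of_pos (by norm_num)
        set m := PySem.Int.floordiv (l + h) 2 with hm
        have hlm : l < m := by omega
        have hmh : m < h := by omega
        rcases hcm : PySem.List.pyGet? C m with _ | cm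
        · rw [dif_neg (by simp [hcm])]
          simp [hne, hcm]
        rw [dif_pos (by simp [hcm] : (PySem.List.pyGet? C m).isSome = true)]
        simp only [hcm]
        generalize hcm2 : Option.getD (some cm) (0:Int) = cm2
        rw [Option.getD_some] at hcm2
        subst hcm2
        rw [pvEncode_eq B cl ch (cm - cl)]
        set B1 := pvEncode B (pvClog2 ((ch - cl).toNat + 1)) (cm - cl) with hB1
        rw [ih l m (by omega) B1 ((m, h) :: st)]
        rw [ih m h (by omega) (IC B1 C l m) st]
        simp only [hlm, hmh, dif_pos, if_pos hne]
      · rw [not_not] at hne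
        rw [dif_neg (by simp [hne]), dif_pos hhl]
        simp [hne]
    · rw [dif_neg (by simp [hhl]), dif_neg hhl]

-- ===== VERDICT (by name: the statement is the Claim_ definition above) =====
theorem IC_spec : Claim_equal_IC := by
  intro B C L H _hDom _hPre
  unfold Spec_IC IC_alt
  have := icLoop_IC C ((H - L).toNat) L H (le_refl _) B []
  rw [this, icLoop]
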